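-- pv_equiv track=rewrite | github.com/E-Sieben/Sloth-Bytes-Weekly-Challenges | W17-Word_Buckets/main.py | split_into_buckets
-- ===== SOURCE A (Python) =====
-- def split_into_buckets(sentence: str, size: int) -> list[str]:
--     words = sentence.split(" ")
--     split_sentences: list[str] = []
--     i: int = 0
--     while i < len(words):
--         if len(words[i]) > size:
--             i += 1
--             continue
--         elif len(words[i]) == size:
--             split_sentences.append(words[i])
--             i += 1
--         else:
--             compound: str = words[i]
--             j: int = i + 1
--             while j < len(words):
--                 prev_compound: str = compound
--                 if j < len(words):
--                     compound = compound + " " + words[j]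
--                 if len(compound) > size:
--                     split_sentences.append(prev_compound)
--                     i = j
--                     break
--                 elif len(compound) == size:
--                     split_sentences.append(compound)
--                     i = j + 1
--                     break
--                 j += 1
--             if j == len(words):
--                 split_sentences.append(compound)
--                 i = j
--     return split_sentences
-- ===== SOURCE B (Python) =====
-- def split_into_buckets(sentence: str, size: int) -> list[str]:
--     buckets: list[str] = []
--     current = None  # None = no open bucket; distinct from the empty-string word
--     for w in sentence.split(" "):
--         if len(w) > size:
--             if current is not None:
--                 buckets.append(current)
--                 current = None
--         elif current is None:
--             current = w
--         else:
--             cand = current + " " + w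
--             if len(cand) <= size:
--                 current = cand
--             else:
--                 buckets.append(current)
--                 current = w
--     if current is not None:
--         buckets.append(current)
--     return buckets
-- ===== Notes on version B (the rewrite author's own statement) =====
-- stated objective: simpler
-- what changed: Replaced A's two nested index-driven while-loops (with prev_compound rollback and i=j reconsideration of the word that overflowed the bucket) by a single pass over the words keeping one Option accumulator for the open bucket, flushed when a word does not fit.
import Mathlib
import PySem

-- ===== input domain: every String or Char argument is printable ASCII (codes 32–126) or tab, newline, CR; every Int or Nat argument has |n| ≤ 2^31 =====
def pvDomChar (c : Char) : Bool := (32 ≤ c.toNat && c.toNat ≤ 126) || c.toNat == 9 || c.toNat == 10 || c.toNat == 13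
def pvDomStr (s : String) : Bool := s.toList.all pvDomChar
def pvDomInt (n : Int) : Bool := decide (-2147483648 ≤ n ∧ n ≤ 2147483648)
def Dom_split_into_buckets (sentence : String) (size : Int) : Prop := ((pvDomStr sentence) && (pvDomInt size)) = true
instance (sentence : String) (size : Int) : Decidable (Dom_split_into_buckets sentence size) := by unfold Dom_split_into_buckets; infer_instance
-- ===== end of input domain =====

-- B replaces A's two nested index-driven while-loops (with prev_compound rollback and i=j
-- reconsideration) by a single pass over the words with one Option accumulator (objective: simpler).

-- ===== PORT A =====
-- A's inner while-loop over j: returns (the strings appended during the loop, the new value of i).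
-- A's "if j < len(words)" guard inside the loop body is always true there and is dropped.
def innerA (words : List String) (size : Int) (compound : String) (j : Nat) : List String × Nat :=
  if h : j < words.length then
    -- prev_compound = compound; compound = compound + " " + words[j]
    if PySem.Str.len (compound ++ " " ++ words[j]) > size then ([compound], j)
    else if PySem.Str.len (compound ++ " " ++ words[j]) = size then
      ([compound ++ " " ++ words[j]], j + 1)
    else innerA words size (compound ++ " " ++ words[j]) (j + 1)
  else ([compound], j)
termination_by words.length - j
decreasing_by exact Nat.sub_succ_lt_self words.length j h

-- needed by outerA's termination: the inner loop never moves i backwards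
lemma innerA_snd_ge (words : List String) (size : Int) :
    ∀ n j compound, words.length ≤ j + n → j ≤ (innerA words size compound j).2 := by
  intro n
  induction n with
  | zero =>
    intro j c hj
    rw [innerA]; simp [show ¬ j < words.length by omega]
  | succ n ih =>
    intro j c hj
    by_cases h : j < words.length
    · rw [innerA]; simp only [dif_pos h]
      split
      · simp
      · split
        · simp
        · have := ih (j + 1) (c ++ " " ++ words[j]) (by omega); omega
    · rw [innerA]; simp [h]

-- A's outer while-loop over i
def outerA (words : List String) (size : Int) (i : Nat) : List String :=
  if h : i < words.length then
    if PySem.Str.len words[i] > size then outerA words size (i + 1)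
    else if PySem.Str.len words[i] = size then words[i] :: outerA words size (i + 1)
    else
      (innerA words size words[i] (i + 1)).1 ++
        outerA words size (innerA words size words[i] (i + 1)).2
  else []
termination_by words.length - i
decreasing_by
  · exact Nat.sub_succ_lt_self words.length i h
  · exact Nat.sub_succ_lt_self words.length i h
  · exact Nat.sub_lt_sub_left h
      (Nat.lt_of_lt_of_le (Nat.lt_succ_self i)
        (innerA_snd_ge words size words.length (i + 1) words[i] (Nat.le_add_left _ _)))

def split_into_buckets (sentence : String) (size : Int) : List String :=
  outerA ((PySem.Str.split? sentence " ").getD []) size 0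

-- ===== PORT B =====
-- loop body of Source B's single for-loop; state = (buckets, current)
def stepB (size : Int) (st : List String × Option String) (w : String) :
    List String × Option String :=
  if PySem.Str.len w > size then
    match st.2 with
    | some c => (st.1 ++ [c], none)
    | none => (st.1, none)
  else
    match st.2 with
    | none => (st.1, some w)
    | some c =>
      if PySem.Str.len (c ++ " " ++ w) ≤ size then (st.1, some (c ++ " " ++ w))
      else (st.1 ++ [c], some w)

-- the final "if current is not None: buckets.append(current)"
def finishB (st : List String × Option String) : List String :=
  match st.2 with
  | some c => st.1 ++ [c]
  | none => st.1

def split_into_buckets_alt (sentence : String) (size : Int) : List String :=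
  finishB ((((PySem.Str.split? sentence " ").getD []).foldl (stepB size) ([], none)))

-- ===== PRECONDITION & SPEC =====
def Spec_split_into_buckets (sentence : String) (size : Int) (out : List String) : Prop := out = split_into_buckets_alt sentence size
instance (sentence : String) (size : Int) (out : List String) : Decidable (Spec_split_into_buckets sentence size out) := by unfold Spec_split_into_buckets; infer_instance

-- ===== CLAIM (what is proved, stated in full; the proofs are below) =====
def Claim_equal_split_into_buckets : Prop := ∀ (sentence : String) (size : Int), Dom_split_into_buckets sentence size → Spec_split_into_buckets sentence size (split_into_buckets sentence size)

-- ===== LEMMAS AND PROOFS =====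

-- recursive reading of B's fold: the buckets still to be emitted from words ws with open bucket cur
def foldB (size : Int) : List String → Option String → List String
  | [], some c => [c]
  | [], none => []
  | w :: ws, cur =>
    if PySem.Str.len w > size then
      (match cur with | some c => [c] | none => []) ++ foldB size ws none
    else
      match cur with
      | none => foldB size ws (some w)
      | some c =>
        if PySem.Str.len (c ++ " " ++ w) ≤ size then foldB size ws (some (c ++ " " ++ w))
        else c :: foldB size ws (some w)

lemma len_concat (c w : String) :
    PySem.Str.len (c ++ " " ++ w) = PySem.Str.len c + 1 + PySem.Str.len w := by
  simp [PySem.Str.len_eq]; omega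

lemma len_nonneg (s : String) : 0 ≤ PySem.Str.len s := by
  simp [PySem.Str.len_eq]

-- a bucket that is already full is emitted before anything else B does
lemma foldB_full (size : Int) (c : String) (h : size ≤ PySem.Str.len c) :
    ∀ ws, foldB size ws (some c) = c :: foldB size ws none := by
  intro ws
  cases ws with
  | nil => simp [foldB]
  | cons w ws =>
    have hcand := len_concat c w
    have hw0 := len_nonneg w
    simp only [foldB]
    split_ifs with h1 h2
    · rfl
    · omega
    · rfl

lemma finishB_foldl (size : Int) :
    ∀ (ws : List String) (acc : List String) (cur : Option String),
      finishB (ws.foldl (stepB size) (acc, cur)) = acc ++ foldB size ws cur := by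
  intro ws
  induction ws with
  | nil => intro acc cur; cases cur <;> simp [finishB, foldB]
  | cons w ws ih =>
    intro acc cur
    cases cur with
    | none =>
      simp only [List.foldl_cons, stepB, foldB]
      split_ifs with h1 <;> simp [ih]
    | some c =>
      simp only [List.foldl_cons, stepB, foldB]
      split_ifs with h1 h2 <;> simp [ih]

-- base case of the main induction: past the end both sides flush and stop
lemma main_base (words : List String) (size : Int) (i : Nat) (h : words.length ≤ i) :
    (outerA words size i = foldB size (words.drop i) none) ∧
    ∀ c, (innerA words size c i).1 ++ outerA words size (innerA words size c i).2
         = foldB size (words.drop i) (some c) := by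
  have hd : words.drop i = [] := List.drop_eq_nil_of_le h
  have ho : outerA words size i = [] := by
    rw [outerA]; simp [Nat.not_lt.mpr h]
  constructor
  · rw [ho, hd]; simp [foldB]
  · intro c
    rw [innerA]; simp only [dif_neg (Nat.not_lt.mpr h)]
    rw [ho, hd]; simp [foldB]

-- the main invariant: A's outer loop from i (resp. inner loop from i with open compound c)
-- produces exactly what B's single pass produces on the remaining words
lemma main_inv (words : List String) (size : Int) :
    ∀ n i, words.length ≤ i + n →
      (outerA words size i = foldB size (words.drop i) none) ∧
      ∀ c, (innerA words size c i).1 ++ outerA words size (innerA words size c i).2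
           = foldB size (words.drop i) (some c) := by
  intro n
  induction n with
  | zero => intro i hi; exact main_base words size i (by omega)
  | succ n ih =>
    intro i hi
    by_cases h : i < words.length
    · have hdrop : words.drop i = words[i] :: words.drop (i + 1) :=
        List.drop_eq_getElem_cons h
      have ihP := (ih (i + 1) (by omega)).1
      have ihQ := (ih (i + 1) (by omega)).2
      constructor
      · rw [outerA]; simp only [dif_pos h]
        rw [hdrop]
        by_cases h1 : PySem.Str.len words[i] > size
        · rw [if_pos h1, ihP]
          simp only [foldB]; rw [if_pos h1]; simp
        · rw [if_neg h1]
          by_cases h2 : PySem.Str.len words[i] = size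
          · rw [if_pos h2]
            have hfull : foldB size (words[i] :: words.drop (i + 1)) none
                = words[i] :: foldB size (words.drop (i + 1)) none := by
              simp only [foldB]; rw [if_neg h1]
              exact foldB_full size words[i] (le_of_eq h2.symm) _
            rw [hfull, ihP]
          · rw [if_neg h2]
            have hstep : foldB size (words[i] :: words.drop (i + 1)) none
                = foldB size (words.drop (i + 1)) (some words[i]) := by
              simp only [foldB]; rw [if_neg h1]
            rw [hstep]
            exact ihQ words[i]
      · intro c
        rw [innerA]; simp only [dif_pos h]
        rw [hdrop]
        have hlen := len_concat c words[i]
        have hc0 := len_nonneg c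
        have hw0 := len_nonneg words[i]
        by_cases g1 : PySem.Str.len (c ++ " " ++ words[i]) > size
        · -- inner loop flushes prev_compound and sets i = j; B flushes current
          rw [if_pos g1]
          by_cases gw : PySem.Str.len words[i] > size
          · -- next word oversized: both skip it
            have houter : outerA words size i = outerA words size (i + 1) := by
              rw [outerA]; simp only [dif_pos h]; rw [if_pos gw]
            show [c] ++ outerA words size i = _
            rw [houter, ihP]
            simp only [foldB]
            rw [if_pos gw]
          · -- next word fits alone: A reconsiders it at i = j, B keeps it as current
            have gcand : ¬ PySem.Str.len (c ++ " " ++ words[i]) ≤ size := not_le.mpr g1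
            show [c] ++ outerA words size i = _
            simp only [foldB]; rw [if_neg gw, if_neg gcand]
            simp only [List.singleton_append, List.cons_inj_right]
            rw [outerA]; simp only [dif_pos h]; rw [if_neg gw]
            by_cases g2 : PySem.Str.len words[i] = size
            · rw [if_pos g2, ihP,
                foldB_full size words[i] (le_of_eq g2.symm) (words.drop (i + 1))]
            · rw [if_neg g2]; exact ihQ words[i]
        · by_cases g2 : PySem.Str.len (c ++ " " ++ words[i]) = size
          · -- compound exactly fills the bucket
            rw [if_neg g1, if_pos g2]
            have gw : ¬ PySem.Str.len words[i] > size := by intro hgt; linarith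
            show [c ++ " " ++ words[i]] ++ outerA words size (i + 1) = _
            simp only [foldB]; rw [if_neg gw, if_pos (le_of_eq g2)]
            rw [foldB_full size _ (le_of_eq g2.symm), ihP]
            simp
          · -- compound still below the limit: both keep accumulating
            rw [if_neg g1, if_neg g2]
            have gw : ¬ PySem.Str.len words[i] > size := by
              intro hgt; have := not_lt.mp g1; linarith
            simp only [foldB]; rw [if_neg gw, if_pos (not_lt.mp g1)]
            exact ihQ (c ++ " " ++ words[i])
    · exact main_base words size i (by omega)

-- ===== VERDICT (by name: the statement is the Claim_ definition above) =====
theorem split_into_buckets_spec : Claim_equal_split_into_buckets := by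
  intro sentence size _
  unfold Spec_split_into_buckets split_into_buckets split_into_buckets_alt
  rw [finishB_foldl size _ [] none, List.nil_append]
  have := (main_inv ((PySem.Str.split? sentence " ").getD []) size
      ((PySem.Str.split? sentence " ").getD []).length 0 (by omega)).1
  simpa using this
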